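-- pv_equiv track=rewrite | github.com/ImGeuntae/CodingTest | 프로그래머스/1/140108. 문자열 나누기/문자열 나누기.py | solution
-- ===== SOURCE A (Python) =====
-- def solution(s):
--     answer = 0
--     s = list(s)
--     while s:
--         count = [0,0]
--         for i in range(len(s)):
--             if s[i] == s[0]:
--                 count[0] += 1
--             else:
--                 count[1] += 1
--             if (count[0] == count[1]) or (i == len(s)-1):
--                 answer += 1
--                 del s[:i+1]
--                 break
--     return answer
-- ===== SOURCE B (Python) =====
-- def solution(s):
--     answer = 0
--     same = diff = 0
--     x = ''
--     for ch in s: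
--         if same == 0 and diff == 0:
--             x = ch
--             same = 1
--         elif ch == x:
--             same += 1
--         else:
--             diff += 1
--         if same == diff:
--             answer += 1
--             same = diff = 0
--     if same or diff:
--         answer += 1
--     return answer
-- ===== Notes on version B (the rewrite author's own statement) =====
-- stated objective: faster
-- what changed: Replaced the restart-from-scratch outer while loop with O(n^2) list slicing/deletion by a single left-to-right pass keeping match/mismatch counters that reset when they tie, counting segments as they close.
import Mathlib
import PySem

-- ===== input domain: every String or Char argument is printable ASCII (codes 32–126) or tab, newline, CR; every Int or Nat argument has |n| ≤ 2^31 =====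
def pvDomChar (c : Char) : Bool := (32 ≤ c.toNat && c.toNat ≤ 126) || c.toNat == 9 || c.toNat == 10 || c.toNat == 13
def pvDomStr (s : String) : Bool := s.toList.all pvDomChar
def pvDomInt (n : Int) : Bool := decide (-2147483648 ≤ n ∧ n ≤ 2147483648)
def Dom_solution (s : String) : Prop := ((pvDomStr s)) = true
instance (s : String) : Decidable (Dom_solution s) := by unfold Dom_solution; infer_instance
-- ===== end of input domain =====

-- B replaces A's quadratic restart/slice loop by one linear pass with match/mismatch counters (objective: faster, asymptotic).

-- ===== PORT A =====
-- A's inner for loop: counts matches/mismatches against c; returns i+1 of the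
-- index where the break fires (counts tie, or last element reached).
def forA (c : Char) : List Char → Int → Int → Nat
  | [], _, _ => 0
  | ch :: rest, c0, c1 =>
    let c0' := if ch = c then c0 + 1 else c0
    let c1' := if ch = c then c1 else c1 + 1
    if c0' = c1' ∨ rest = [] then 1 else 1 + forA c rest c0' c1'

theorem forA_pos (c ch : Char) (rest : List Char) (c0 c1 : Int) :
    1 ≤ forA c (ch :: rest) c0 c1 := by
  rw [forA]; split <;> split <;> omega

-- A's outer while loop: answer += 1, delete the consumed prefix, repeat.
def solution_core : List Char → Int
  | [] => 0
  | ch :: rest =>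
    let k := forA ch (ch :: rest) 0 0
    1 + solution_core ((ch :: rest).drop k)
termination_by l => l.length
decreasing_by
  have h := forA_pos ch ch rest 0 0
  simp only [List.length_drop, List.length_cons]
  omega

def solution (s : String) : Int := solution_core s.toList

-- ===== PORT B =====
-- B's single pass: state (answer, same, diff, x); a tie closes a segment.
def altLoop : List Char → Int → Int → Int → Char → Int
  | [], ans, same, diff, _ => if same ≠ 0 ∨ diff ≠ 0 then ans + 1 else ans
  | ch :: rest, ans, same, diff, x =>
    if same = 0 ∧ diff = 0 then
      altLoop rest ans 1 0 ch
    else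
      let same' := if ch = x then same + 1 else same
      let diff' := if ch = x then diff else diff + 1
      if same' = diff' then altLoop rest (ans + 1) 0 0 x
      else altLoop rest ans same' diff' x

def solution_alt (s : String) : Int := altLoop s.toList 0 0 0 ' '

-- ===== PRECONDITION & SPEC =====
def Spec_solution (s : String) (out : Int) : Prop := out = solution_alt s
instance (s : String) (out : Int) : Decidable (Spec_solution s out) := by unfold Spec_solution; infer_instance

-- ===== CLAIM (what is proved, stated in full; the proofs are below) =====
def Claim_equal_solution : Prop := ∀ (s : String), Dom_solution s → Spec_solution s (solution s)

-- ===== LEMMAS AND PROOFS =====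
theorem drop_one_add (k : Nat) (ch : Char) (l : List Char) :
    List.drop (1 + k) (ch :: l) = List.drop k l := by
  rw [Nat.add_comm]; simp

theorem alt_core (n : Nat) :
    ∀ s : List Char, s.length ≤ n →
      (∀ (ans : Int) (x : Char), altLoop s ans 0 0 x = ans + solution_core s) ∧
      (∀ (ans c0 c1 : Int) (c : Char), s ≠ [] → c0 ≠ c1 →
        altLoop s ans c0 c1 c = ans + 1 + solution_core (s.drop (forA c s c0 c1))) := by
  induction n using Nat.strong_induction_on with
  | _ n ih =>
    intro s hlen
    constructor
    · intro ans x
      cases s with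
      | nil => simp [altLoop, solution_core]
      | cons ch rest =>
        have hstep : altLoop (ch :: rest) ans 0 0 x = altLoop rest ans 1 0 ch := by
          rw [altLoop]; simp
        rw [solution_core, hstep]
        cases rest with
        | nil =>
          simp [altLoop, forA, solution_core]
        | cons r rs =>
          have hmid := (ih (r :: rs).length (by simp at hlen ⊢; omega) (r :: rs) le_rfl).2
            ans 1 0 ch (by simp) (by omega)
          rw [hmid]
          have hk : forA ch (ch :: r :: rs) 0 0 = 1 + forA ch (r :: rs) 1 0 := by
            rw [forA]; simp
          rw [hk, drop_one_add]
          ring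
    · intro ans c0 c1 c hs hne
      cases s with
      | nil => exact absurd rfl hs
      | cons ch rest =>
        rw [altLoop]
        have hnotz : ¬ (c0 = 0 ∧ c1 = 0) := by rintro ⟨h0, h1⟩; exact hne (h0.trans h1.symm)
        rw [if_neg hnotz, forA]
        set c0' := if ch = c then c0 + 1 else c0 with hc0'
        set c1' := if ch = c then c1 else c1 + 1 with hc1'
        by_cases heq : c0' = c1'
        · rw [if_pos heq, if_pos (Or.inl heq)]
          have hmain := (ih rest.length (by simp at hlen; omega) rest le_rfl).1 (ans + 1) c
          rw [hmain]
          have : List.drop 1 (ch :: rest) = rest := rfl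
          rw [this]
        · rw [if_neg heq]
          cases rest with
          | nil =>
            rw [if_pos (Or.inr rfl)]
            have h1 : c0' ≠ 0 ∨ c1' ≠ 0 := by omega
            simp [altLoop, h1, solution_core]
          | cons r rs =>
            rw [if_neg (by simp [heq])]
            have hmid := (ih (r :: rs).length (by simp at hlen ⊢; omega) (r :: rs) le_rfl).2
              ans c0' c1' c (by simp) heq
            rw [hmid, drop_one_add]

-- ===== VERDICT (by name: the statement is the Claim_ definition above) =====
theorem solution_spec : Claim_equal_solution := by
  intro s _
  unfold Spec_solution solution solution_alt
  rw [(alt_core s.toList.length s.toList le_rfl).1 0 ' ']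
  ring
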